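-- pv_equiv track=rewrite | github.com/isprogfun/EnpassToPassLocker | converter.py | constructLine
-- ===== SOURCE A (Python) =====
-- def constructLine(splittedItem):
--     entry = []
--     notes = ''
--     withoutUsername = True
--     withoutPassword = True
--     usernameAsEmail = False
--
--     # Try to find `Username`
--     for line in splittedItem:
--         if line.startswith('Username'):
--             withoutUsername = False
--             entry.append(line.replace('Username ', ''))
--     # If there is no `Username` field — try to find `E-Mail` and use it as `Username`
--     if withoutUsername:
--         for line in splittedItem:
--             if (line.startswith('E-Mail') or line.startswith('Email') or line.startswith('E-mail')):
--                 withoutUsername = False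
--                 usernameAsEmail = True
--                 entry.append(line.replace('E-Mail ', '').replace('Email ', '').replace('E-mail', ''))
--     # If there is no `E-Mail` — field is filled with `none`
--     if withoutUsername:
--         entry.append('none')
--     # Try to find `Password`
--     for line in splittedItem:
--         if line.startswith('Password'):
--             withoutPassword = False
--             entry.append(line.replace('Password ', ''))
--     # If there is no `Password` — field is filled with `none`
--     if withoutPassword:
--         entry.append('none')
--     # Everything else goes to `notes` section
--     for line in splittedItem:
--         if (not line.startswith('Password') and not line.startswith('Username')) and not ((line.startswith('E-Mail') or line.startswith('Email') or line.startswith('E-mail')) and usernameAsEmail):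
--             notes += line.replace('Url ', '').replace('E-Mail ', '').replace('Email ', '').replace('E-mail', '')
--     entry.append(notes)
--     return entry
-- ===== SOURCE B (Python) =====
-- def constructLine(splittedItem):
--     # single-pass partition into buckets, then assemble
--     usernames = []
--     emails = []
--     passwords = []
--     others = []  # (is_email, line) in original order
--     for line in splittedItem:
--         if line.startswith('Username'):
--             usernames.append(line.replace('Username ', ''))
--         else:
--             isEmail = line.startswith('E-Mail') or line.startswith('Email') or line.startswith('E-mail')
--             if isEmail:
--                 emails.append(line)
--             if line.startswith('Password'):
--                 passwords.append(line.replace('Password ', ''))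
--             else:
--                 others.append((isEmail, line))
--     usernameAsEmail = not usernames and bool(emails)
--     if usernames:
--         entry = usernames
--     elif emails:
--         entry = [e.replace('E-Mail ', '').replace('Email ', '').replace('E-mail', '') for e in emails]
--     else:
--         entry = ['none']
--     entry.extend(passwords if passwords else ['none'])
--     notes = ''.join(
--         line.replace('Url ', '').replace('E-Mail ', '').replace('Email ', '').replace('E-mail', '')
--         for isEmail, line in others
--         if not (isEmail and usernameAsEmail))
--     entry.append(notes)
--     return entry
-- ===== Notes on version B (the rewrite author's own statement) =====
-- stated objective: alternative
-- what changed: Replaces A's four separate passes over splittedItem with one pass that partitions lines into username/email/password/other buckets, assembling the entry afterwards.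
import Mathlib
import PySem

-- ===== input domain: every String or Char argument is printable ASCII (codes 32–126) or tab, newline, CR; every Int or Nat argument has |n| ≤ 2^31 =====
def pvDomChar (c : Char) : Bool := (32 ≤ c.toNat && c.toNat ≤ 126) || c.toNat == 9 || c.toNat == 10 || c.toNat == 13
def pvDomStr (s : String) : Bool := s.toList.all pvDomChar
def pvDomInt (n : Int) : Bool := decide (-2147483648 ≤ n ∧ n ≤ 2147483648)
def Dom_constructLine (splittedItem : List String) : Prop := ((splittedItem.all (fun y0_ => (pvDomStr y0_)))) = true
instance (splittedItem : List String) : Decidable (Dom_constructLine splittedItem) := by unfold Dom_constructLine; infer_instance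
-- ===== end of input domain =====

-- B: one pass partitioning lines into username/email/password/other buckets, assembled afterwards (alternative decomposition of A's four passes).

-- shared line predicates / cleaners (the replace-chains both Pythons write inline)
def pvPU (l : String) : Bool := PySem.Str.startswith l "Username"
def pvPE (l : String) : Bool := PySem.Str.startswith l "E-Mail" || PySem.Str.startswith l "Email" || PySem.Str.startswith l "E-mail"
def pvPP (l : String) : Bool := PySem.Str.startswith l "Password"
def pvCleanU (l : String) : String := PySem.Str.replace l "Username " ""
def pvCleanE (l : String) : String := PySem.Str.replace (PySem.Str.replace (PySem.Str.replace l "E-Mail " "") "Email " "") "E-mail" ""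
def pvCleanP (l : String) : String := PySem.Str.replace l "Password " ""
def pvCleanN (l : String) : String := pvCleanE (PySem.Str.replace l "Url " "")

-- ===== PORT A =====
def constructLine (splittedItem : List String) : List String :=
  let s1 := splittedItem.foldl (fun (st : List String × Bool) line =>
      if pvPU line then (st.1 ++ [pvCleanU line], false) else st)
    (([] : List String), true)
  let s2 := if s1.2 then
      splittedItem.foldl (fun (st : List String × Bool × Bool) line =>
        if pvPE line then (st.1 ++ [pvCleanE line], false, true) else st)
        (s1.1, s1.2, false)
    else (s1.1, s1.2, false)
  let entry1 := if s2.2.1 then s2.1 ++ ["none"] else s2.1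
  let s3 := splittedItem.foldl (fun (st : List String × Bool) line =>
      if pvPP line then (st.1 ++ [pvCleanP line], false) else st)
    (entry1, true)
  let entry2 := if s3.2 then s3.1 ++ ["none"] else s3.1
  let notes := splittedItem.foldl (fun (n : String) line =>
      if !pvPP line && !pvPU line && !(pvPE line && s2.2.2) then n ++ pvCleanN line else n) ""
  entry2 ++ [notes]

-- ===== PORT B =====
def constructLine_alt (splittedItem : List String) : List String :=
  let st := splittedItem.foldl
    (fun (st : List String × List String × List String × List (Bool × String)) line =>
      let (u, e, p, o) := st
      if pvPU line then (u ++ [pvCleanU line], e, p, o)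
      else
        let e' := if pvPE line then e ++ [line] else e
        if pvPP line then (u, e', p ++ [pvCleanP line], o)
        else (u, e', p, o ++ [(pvPE line, line)]))
    (([] : List String), ([] : List String), ([] : List String), ([] : List (Bool × String)))
  let u := st.1
  let e := st.2.1
  let p := st.2.2.1
  let o := st.2.2.2
  let uae := u.isEmpty && !e.isEmpty
  let entry := if !u.isEmpty then u else if !e.isEmpty then e.map pvCleanE else ["none"]
  let entry := entry ++ (if !p.isEmpty then p else ["none"])
  entry ++ [PySem.Str.join "" ((o.filter (fun t => !(t.1 && uae))).map (fun t => pvCleanN t.2))]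

-- ===== PRECONDITION & SPEC =====
def Spec_constructLine (splittedItem : List String) (out : List String) : Prop := out = constructLine_alt splittedItem
instance (splittedItem : List String) (out : List String) : Decidable (Spec_constructLine splittedItem out) := by unfold Spec_constructLine; infer_instance

-- ===== CLAIM (what is proved, stated in full; the proofs are below) =====
def Claim_equal_constructLine : Prop := ∀ (splittedItem : List String), Dom_constructLine splittedItem → Spec_constructLine splittedItem (constructLine splittedItem)

-- ===== LEMMAS AND PROOFS =====

-- A's 'collect + withoutX flag' loops
theorem foldl_pair (q : String → Bool) (f : String → String) :
    ∀ (s : List String) (acc : List String) (w : Bool),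
      s.foldl (fun (st : List String × Bool) l => if q l then (st.1 ++ [f l], false) else st) (acc, w)
        = (acc ++ (s.filter q).map f, w && !s.any q) := by
  intro s
  induction s with
  | nil => intro acc w; simp
  | cons h t ih =>
    intro acc w
    by_cases hq : q h = true <;> simp [List.foldl_cons, hq, ih]

-- A's email loop (flag + usernameAsEmail)
theorem foldl_triple :
    ∀ (s : List String) (acc : List String) (w a : Bool),
      s.foldl (fun (st : List String × Bool × Bool) l =>
          if pvPE l then (st.1 ++ [pvCleanE l], false, true) else st) (acc, w, a)
        = (acc ++ (s.filter pvPE).map pvCleanE, w && !s.any pvPE, a || s.any pvPE) := by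
  intro s
  induction s with
  | nil => intro acc w a; simp
  | cons h t ih =>
    intro acc w a
    by_cases hq : pvPE h = true <;> simp [List.foldl_cons, hq, ih]

-- B's single bucket-building pass
theorem foldl_buckets :
    ∀ (s : List String) (u e p : List String) (o : List (Bool × String)),
      s.foldl (fun (st : List String × List String × List String × List (Bool × String)) line =>
          let (u, e, p, o) := st
          if pvPU line then (u ++ [pvCleanU line], e, p, o)
          else
            let e' := if pvPE line then e ++ [line] else e
            if pvPP line then (u, e', p ++ [pvCleanP line], o)
            else (u, e', p, o ++ [(pvPE line, line)])) (u, e, p, o)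
        = (u ++ (s.filter pvPU).map pvCleanU,
           e ++ s.filter (fun l => !pvPU l && pvPE l),
           p ++ (s.filter (fun l => !pvPU l && pvPP l)).map pvCleanP,
           o ++ (s.filter (fun l => !pvPU l && !pvPP l)).map (fun l => (pvPE l, l))) := by
  intro s
  induction s with
  | nil => intro u e p o; simp
  | cons h t ih =>
    intro u e p o
    by_cases hU : pvPU h = true
    · simp [List.foldl_cons, hU, ih]
    · by_cases hP : pvPP h = true <;> by_cases hE : pvPE h = true <;>
        simp [List.foldl_cons, hU, hP, hE, ih]

theorem inter_nil_cons (x : List Char) (xs : List (List Char)) :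
    List.intercalate [] (x :: xs) = x ++ List.intercalate [] xs := by
  cases xs <;> simp [List.intercalate, List.intersperse]

theorem join_nil_cons (a : String) (l : List String) :
    PySem.Str.join "" (a :: l) = a ++ PySem.Str.join "" l := by
  apply String.toList_injective
  simp [PySem.Str.toList_join, PySem.Chars.join, inter_nil_cons]

theorem join_empty : PySem.Str.join "" ([] : List String) = "" := by
  apply String.toList_injective
  simp [PySem.Str.toList_join, PySem.Chars.join, List.intercalate]

-- A's notes loop equals '' .join of the cleaned filtered lines
theorem foldl_notes (c : String → Bool) :
    ∀ (s : List String) (n0 : String),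
      s.foldl (fun (n : String) l => if c l then n ++ pvCleanN l else n) n0
        = n0 ++ PySem.Str.join "" ((s.filter c).map pvCleanN) := by
  intro s
  induction s with
  | nil => intro n0; simp [join_empty]
  | cons h t ih =>
    intro n0
    by_cases hc : c h = true <;>
      simp [List.foldl_cons, hc, ih, join_nil_cons, String.append_assoc]

theorem pU_not_pP (l : String) : pvPU l = true → pvPP l = false := by
  intro h
  by_contra hP
  simp only [Bool.not_eq_false] at hP
  simp only [pvPU, pvPP, PySem.Str.startswith_eq, PySem.Chars.startswith_iff] at h hP
  obtain ⟨t, ht⟩ := h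
  rw [show ("Username".toList) = 'U' :: "sername".toList from rfl] at ht
  obtain ⟨t2, ht2⟩ := hP
  rw [show ("Password".toList) = 'P' :: "assword".toList from rfl, ← ht] at ht2
  simp at ht2

theorem isEmpty_filter (q : String → Bool) (s : List String) :
    (s.filter q).isEmpty = !s.any q := by
  induction s with
  | nil => simp
  | cons h t ih => by_cases hq : q h = true <;> simp [hq, ih]

-- ===== VERDICT (by name: the statement is the Claim_ definition above) =====
theorem constructLine_spec : Claim_equal_constructLine := by
  intro s _
  unfold Spec_constructLine constructLine constructLine_alt
  have hPP : (fun l => !pvPU l && pvPP l) = pvPP := funext fun l => by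
    cases h : pvPU l
    · simp
    · simp [pU_not_pP l h]
  simp only [foldl_pair, foldl_triple, foldl_buckets, hPP, List.nil_append, Bool.true_and,
    Bool.false_or, List.isEmpty_map, isEmpty_filter, foldl_notes, List.filter_map,
    List.map_map]
  by_cases hU : s.any pvPU = true
  · -- usernames present
    have hswap : List.filter (fun l => !pvPP l && !pvPU l) s
        = List.filter (fun l => !pvPU l && !pvPP l) s :=
      List.filter_congr fun x _ => by cases pvPU x <;> cases pvPP x <;> simp
    by_cases hP : s.any pvPP = true
    · simp only [List.any_eq_true] at hP
      have hPn : ¬ ∀ x ∈ s, pvPP x = false := by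
        obtain ⟨x, hx, h⟩ := hP; intro hall; simp [hall x hx] at h
      simp [hU, hP, hPn, hswap, Function.comp_def, List.append_assoc]
    · have hall : ∀ x ∈ s, pvPP x = false := by simpa using List.any_eq_false.mp (by simpa using hP)
      have hPe : ¬ ∃ x ∈ s, pvPP x = true := by
        rintro ⟨x, hx, h⟩; simp [hall x hx] at h
      have hP0 : List.filter pvPP s = [] := List.filter_eq_nil_iff.mpr (by simpa using hall)
      simp [hU, hPe, hP0, hswap, Function.comp_def, List.append_assoc]
      rw [if_pos hall]
      simp [List.append_assoc]
  · have hUf : ∀ x ∈ s, pvPU x = false := by simpa using List.any_eq_false.mp (by simpa using hU)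
    have h0 : List.filter pvPU s = [] := List.filter_eq_nil_iff.mpr (by simpa using hUf)
    by_cases hE : s.any pvPE = true
    · -- no username, email present
      have hAny : (s.any fun l => !pvPU l && pvPE l) = true := by
        obtain ⟨x, hx, h⟩ := List.any_eq_true.mp hE
        exact List.any_eq_true.mpr ⟨x, hx, by simp [hUf x hx, h]⟩
      have hEex : ∃ x ∈ s, pvPU x = false ∧ pvPE x = true := by
        obtain ⟨x, hx, h⟩ := List.any_eq_true.mp hE
        exact ⟨x, hx, hUf x hx, h⟩
      have hEn : ¬ ∀ x ∈ s, pvPE x = false := by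
        obtain ⟨x, hx, h⟩ := List.any_eq_true.mp hE
        intro hall; simp [hall x hx] at h
      have he : List.filter (fun l => !pvPU l && pvPE l) s = List.filter pvPE s :=
        List.filter_congr fun x hx => by simp [hUf x hx]
      have hnotes : List.filter (fun l => !pvPP l && !pvPU l && !pvPE l) s
          = List.filter (fun a => !pvPE a && (!pvPU a && !pvPP a)) s :=
        List.filter_congr fun x hx => by
          cases pvPE x <;> cases pvPP x <;> simp [hUf x hx]
      by_cases hP : s.any pvPP = true
      · simp only [List.any_eq_true] at hP
        have hPn : ¬ ∀ x ∈ s, pvPP x = false := by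
          obtain ⟨x, hx, h⟩ := hP; intro hall; simp [hall x hx] at h
        simp [hU, hE, h0, hP, hPn, he, hAny, hnotes, Function.comp_def, List.append_assoc]
      · have hall : ∀ x ∈ s, pvPP x = false := by simpa using List.any_eq_false.mp (by simpa using hP)
        have hPe : ¬ ∃ x ∈ s, pvPP x = true := by
          rintro ⟨x, hx, h⟩; simp [hall x hx] at h
        have hP0 : List.filter pvPP s = [] := List.filter_eq_nil_iff.mpr (by simpa using hall)
        simp [hU, hE, h0, hPe, hP0, he, hAny, hnotes, Function.comp_def, List.append_assoc]
        rw [if_pos hall]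
        simp [List.append_assoc]
    · -- neither username nor email
      have hEf : ∀ x ∈ s, pvPE x = false := by simpa using List.any_eq_false.mp (by simpa using hE)
      have hE0 : List.filter pvPE s = [] := List.filter_eq_nil_iff.mpr (by simpa using hEf)
      have hEany : s.any pvPE = false := by simpa using hE
      have hEne : ¬ ∃ x ∈ s, pvPU x = false ∧ pvPE x = true := by
        rintro ⟨x, hx, -, h⟩; simp [hEf x hx] at h
      have hAny : (s.any fun l => !pvPU l && pvPE l) = false :=
        List.any_eq_false.mpr (by intro x hx; simp [hEf x hx])
      have hnotes : List.filter (fun l => !pvPP l && !pvPU l) s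
          = List.filter (fun a => !pvPU a && !pvPP a) s :=
        List.filter_congr fun x _ => by cases pvPU x <;> cases pvPP x <;> simp
      by_cases hP : s.any pvPP = true
      · simp only [List.any_eq_true] at hP
        have hPn : ¬ ∀ x ∈ s, pvPP x = false := by
          obtain ⟨x, hx, h⟩ := hP; intro hall; simp [hall x hx] at h
        simp [hU, hEany, h0, hE0, hP, hPn, hAny, hnotes, Function.comp_def]
      · have hall : ∀ x ∈ s, pvPP x = false := by simpa using List.any_eq_false.mp (by simpa using hP)
        have hPe : ¬ ∃ x ∈ s, pvPP x = true := by
          rintro ⟨x, hx, h⟩; simp [hall x hx] at h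
        have hP0 : List.filter pvPP s = [] := List.filter_eq_nil_iff.mpr (by simpa using hall)
        simp [hU, hEany, h0, hE0, hPe, hP0, hAny, hnotes, Function.comp_def]
        rw [if_pos hall]
        simp
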